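-- pv_equiv track=rewrite | github.com/bharadwajvyadavalli/coding_patterns | palindromic_subsequence.py | longest_palindromic_subsequence_with_k_changes
-- ===== SOURCE A (Python) =====
-- from typing import List, Tuple, Set, Dict
-- from functools import lru_cache
--
-- def longest_palindromic_subsequence_with_k_changes(s: str, k: int) -> Tuple[int, str]:
--     """
--     Custom Hard - Longest Palindromic Subsequence with K Character Changes
--
--     Find longest palindromic subsequence after changing at most k characters.
--     Return length and one possible palindrome.
--
--     Algorithm:
--     1. DP with state (left, right, changes_used)
--     2. Try matching characters or changing one to match
--     3. Reconstruct palindrome from DP decisions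
--
--     Time: O(n² * k), Space: O(n² * k)
--
--     Example:
--     s = "abcbea", k = 1
--     Output: (5, "abcba") - change 'e' to 'c'
--     """
--     n = len(s)
--
--     # dp[i][j][changes] = (length, decisions) for s[i:j+1] with 'changes' used
--     @lru_cache(maxsize=None)
--     def dp(left: int, right: int, changes: int) -> Tuple[int, List[Tuple[int, int, str]]]:
--         if left > right:
--             return 0, []
--         if left == right:
--             return 1, [(left, left, s[left])]
--
--         if s[left] == s[right]:
--             # Characters match, include both
--             length, decisions = dp(left + 1, right - 1, changes)
--             return length + 2, [(left, right, s[left])] + decisions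
--         else:
--             # Characters don't match
--             results = []
--
--             # Option 1: Skip left character
--             length1, decisions1 = dp(left + 1, right, changes)
--             results.append((length1, decisions1))
--
--             # Option 2: Skip right character
--             length2, decisions2 = dp(left, right - 1, changes)
--             results.append((length2, decisions2))
--
--             # Option 3: Change one character to match (if changes available)
--             if changes > 0:
--                 # Change left to match right
--                 length3, decisions3 = dp(left + 1, right - 1, changes - 1)
--                 results.append((length3 + 2, [(left, right, s[right])] + decisions3))
--
--                 # Change right to match left
--                 length4, decisions4 = dp(left + 1, right - 1, changes - 1)
--                 results.append((length4 + 2, [(left, right, s[left])] + decisions4))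
--
--             # Return best option
--             return max(results, key=lambda x: x[0])
--
--     length, decisions = dp(0, n - 1, k)
--
--     # Reconstruct palindrome
--     palindrome_chars = [''] * n
--     for left, right, char in decisions:
--         palindrome_chars[left] = char
--         palindrome_chars[right] = char
--
--     # Build palindrome string
--     palindrome = ''.join(c for c in palindrome_chars if c)
--
--     return length, palindrome
-- ===== SOURCE B (Python) =====
-- from functools import lru_cache
--
-- def longest_palindromic_subsequence_with_k_changes(s: str, k: int):
--     """B: memoize lengths only (O(n^2*k) total), then one backtracking pass
--     following A's tie-break order (skip-left, skip-right, change) to rebuild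
--     the palindrome directly as front + reversed(back)."""
--     n = len(s)
--
--     @lru_cache(maxsize=None)
--     def L(l: int, r: int, c: int) -> int:
--         if l > r:
--             return 0
--         if l == r:
--             return 1
--         if s[l] == s[r]:
--             return L(l + 1, r - 1, c) + 2
--         best = max(L(l + 1, r, c), L(l, r - 1, c))
--         if c > 0:
--             best = max(best, L(l + 1, r - 1, c - 1) + 2)
--         return best
--
--     front, back = [], []
--     l, r, c = 0, n - 1, k
--     while l <= r:
--         if l == r:
--             front.append(s[l])
--             break
--         if s[l] == s[r]:
--             front.append(s[l])
--             back.append(s[l])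
--             l, r = l + 1, r - 1
--         else:
--             best = L(l, r, c)
--             if L(l + 1, r, c) == best:
--                 l += 1
--             elif L(l, r - 1, c) == best:
--                 r -= 1
--             else:
--                 front.append(s[r])
--                 back.append(s[r])
--                 l, r, c = l + 1, r - 1, c - 1
--     return L(0, n - 1, k), ''.join(front) + ''.join(reversed(back))
-- ===== Notes on version B (the rewrite author's own statement) =====
-- stated objective: faster
-- what changed: A's memo stores a decision list per state and concatenates lists at every state (O(n) extra work per state, O(n^3*k) total); B memoizes only integer lengths and reconstructs the palindrome in one backtracking pass that follows A's tie-break order (skip-left, skip-right, change-to-right-char), building front and back halves directly.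
import Mathlib
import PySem

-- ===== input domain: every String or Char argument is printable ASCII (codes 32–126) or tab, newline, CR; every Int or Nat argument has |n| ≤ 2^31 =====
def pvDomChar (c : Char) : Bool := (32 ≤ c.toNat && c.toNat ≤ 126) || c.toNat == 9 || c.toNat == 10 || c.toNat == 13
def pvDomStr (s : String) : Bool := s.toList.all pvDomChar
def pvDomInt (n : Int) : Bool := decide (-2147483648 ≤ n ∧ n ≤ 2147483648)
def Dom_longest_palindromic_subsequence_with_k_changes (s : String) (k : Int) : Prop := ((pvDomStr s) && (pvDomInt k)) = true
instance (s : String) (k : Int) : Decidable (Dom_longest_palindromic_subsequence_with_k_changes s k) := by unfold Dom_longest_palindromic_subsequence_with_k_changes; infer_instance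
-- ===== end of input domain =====

-- B replaces A's list-carrying memo by a length-only memo plus one backtracking pass
-- (same tie-break order), an asymptotically faster exact reconstruction.

-- shared primitive: s[i] for an index that is always in range in every reachable call
-- (exact on that domain; the default is never used)
def pvChar (s : List Char) (i : Int) : Char := (PySem.List.pyGet? s i).getD ' '

-- termination lemmas for the three interval-shrinking recursions (cited by decreasing_by)
theorem pvDecBoth {l r : Int} (h1 : ¬ l > r) (h2 : ¬ l = r) :
    (r - 1 - (l + 1)).toNat < (r - l).toNat := by omega

theorem pvDecLeft {l r : Int} (h1 : ¬ l > r) (h2 : ¬ l = r) :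
    (r - (l + 1)).toNat < (r - l).toNat := by omega

theorem pvDecRight {l r : Int} (h1 : ¬ l > r) (h2 : ¬ l = r) :
    (r - 1 - l).toNat < (r - l).toNat := by omega

-- ===== PORT A =====

-- Python's max(results, key=lambda x: x[0]): first element, replaced only by a strictly greater key
def pvMaxFst (xs : List (Int × List (Int × Int × Char))) : Int × List (Int × Int × Char) :=
  match xs with
  | [] => (0, [])
  | y :: ys => ys.foldl (fun cur z => if z.1 > cur.1 then z else cur) y

-- the lru_cached dp of A, literally (memoisation dropped, values identical)
def pvDpA (s : List Char) (left right changes : Int) : Int × List (Int × Int × Char) :=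
  if left > right then (0, [])
  else if left = right then (1, [(left, left, pvChar s left)])
  else if pvChar s left = pvChar s right then
    let p := pvDpA s (left + 1) (right - 1) changes
    (p.1 + 2, (left, right, pvChar s left) :: p.2)
  else
    let r1 := pvDpA s (left + 1) right changes
    let r2 := pvDpA s left (right - 1) changes
    let results :=
      if changes > 0 then
        let r3 := pvDpA s (left + 1) (right - 1) (changes - 1)
        let r4 := pvDpA s (left + 1) (right - 1) (changes - 1)
        [r1, r2, (r3.1 + 2, (left, right, pvChar s right) :: r3.2),
                 (r4.1 + 2, (left, right, pvChar s left) :: r4.2)]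
      else [r1, r2]
    pvMaxFst results
termination_by (right - left).toNat
decreasing_by
  all_goals first
    | exact pvDecBoth ‹_› ‹_›
    | exact pvDecLeft ‹_› ‹_›
    | exact pvDecRight ‹_› ‹_›

-- the reconstruction loop: palindrome_chars[left] = char; palindrome_chars[right] = char
-- ('' modelled as none; positions are always ≥ 0 and in range)
def pvFill (arr : List (Option Char)) (ds : List (Int × Int × Char)) : List (Option Char) :=
  ds.foldl (fun a d => (a.set d.1.toNat (some d.2.2)).set d.2.1.toNat (some d.2.2)) arr

def longest_palindromic_subsequence_with_k_changes (s : String) (k : Int) : Int × String :=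
  let cs := s.toList
  let n : Int := cs.length
  let p := pvDpA cs 0 (n - 1) k
  let arr := pvFill (List.replicate cs.length (none : Option Char)) p.2
  (p.1, String.mk (arr.filterMap id))

-- ===== PORT B =====

-- length-only dp (B's lru_cached L, literally)
def pvLenB (s : List Char) (l r c : Int) : Int :=
  if l > r then 0
  else if l = r then 1
  else if pvChar s l = pvChar s r then pvLenB s (l + 1) (r - 1) c + 2
  else
    let best := max (pvLenB s (l + 1) r c) (pvLenB s l (r - 1) c)
    if c > 0 then max best (pvLenB s (l + 1) (r - 1) (c - 1) + 2) else best
termination_by (r - l).toNat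
decreasing_by
  all_goals first
    | exact pvDecBoth ‹_› ‹_›
    | exact pvDecLeft ‹_› ‹_›
    | exact pvDecRight ‹_› ‹_›

-- B's while-loop backtrack, as tail recursion over the same (l, r, c, front, back) state
def pvBackB (s : List Char) (l r c : Int) (front back : List Char) : List Char × List Char :=
  if l > r then (front, back)
  else if l = r then (front ++ [pvChar s l], back)
  else if pvChar s l = pvChar s r then
    pvBackB s (l + 1) (r - 1) c (front ++ [pvChar s l]) (back ++ [pvChar s l])
  else
    let best := pvLenB s l r c
    if pvLenB s (l + 1) r c = best then pvBackB s (l + 1) r c front back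
    else if pvLenB s l (r - 1) c = best then pvBackB s l (r - 1) c front back
    else pvBackB s (l + 1) (r - 1) (c - 1) (front ++ [pvChar s r]) (back ++ [pvChar s r])
termination_by (r - l).toNat
decreasing_by
  all_goals first
    | exact pvDecBoth ‹_› ‹_›
    | exact pvDecLeft ‹_› ‹_›
    | exact pvDecRight ‹_› ‹_›

def longest_palindromic_subsequence_with_k_changes_alt (s : String) (k : Int) : Int × String :=
  let cs := s.toList
  let n : Int := cs.length
  let fb := pvBackB cs 0 (n - 1) k [] []
  (pvLenB cs 0 (n - 1) k, String.mk (fb.1 ++ fb.2.reverse))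

-- ===== PRECONDITION & SPEC =====
def Spec_longest_palindromic_subsequence_with_k_changes (s : String) (k : Int) (out : Int × String) : Prop := out = longest_palindromic_subsequence_with_k_changes_alt s k
instance (s : String) (k : Int) (out : Int × String) : Decidable (Spec_longest_palindromic_subsequence_with_k_changes s k out) := by unfold Spec_longest_palindromic_subsequence_with_k_changes; infer_instance

-- ===== CLAIM (what is proved, stated in full; the proofs are below) =====
def Claim_equal_longest_palindromic_subsequence_with_k_changes : Prop := ∀ (s : String) (k : Int), Dom_longest_palindromic_subsequence_with_k_changes s k → Spec_longest_palindromic_subsequence_with_k_changes s k (longest_palindromic_subsequence_with_k_changes s k)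

-- ===== LEMMAS AND PROOFS =====

-- nestedness invariant of A's decision lists inside [l, r]
def pvInv (l r : Int) : List (Int × Int × Char) → Prop
  | [] => True
  | (a, b, _) :: ds => l ≤ a ∧ a ≤ b ∧ b ≤ r ∧ (a = b → ds = []) ∧ pvInv (a + 1) (b - 1) ds

theorem pvInv_mono {l r l' r' : Int} {ds : List (Int × Int × Char)}
    (h : pvInv l r ds) (hl : l' ≤ l) (hr : r ≤ r') : pvInv l' r' ds := by
  cases ds with
  | nil => trivial
  | cons d ds =>
    obtain ⟨a, b, c⟩ := d
    obtain ⟨h1, h2, h3, h4, h5⟩ := h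
    exact ⟨by omega, h2, by omega, h4, h5⟩

theorem pvMaxFst_two (a b : Int × List (Int × Int × Char)) :
    pvMaxFst [a, b] = if b.1 > a.1 then b else a := by
  simp [pvMaxFst, List.foldl]

theorem pvMaxFst_four (a b c d : Int × List (Int × Int × Char)) :
    pvMaxFst [a, b, c, d] =
      (if d.1 > (if c.1 > (if b.1 > a.1 then b else a).1 then c
                 else if b.1 > a.1 then b else a).1 then d
       else if c.1 > (if b.1 > a.1 then b else a).1 then c
       else if b.1 > a.1 then b else a) := by
  simp [pvMaxFst, List.foldl]

theorem pvLen_eq (s : List Char) (l r c : Int) : (pvDpA s l r c).1 = pvLenB s l r c := by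
  rw [pvDpA, pvLenB]
  by_cases h1 : l > r
  · simp [h1]
  · by_cases h2 : l = r
    · simp [h1, h2]
    · by_cases h3 : pvChar s l = pvChar s r
      · simp only [if_neg h1, if_neg h2, if_pos h3]
        have := pvLen_eq s (l + 1) (r - 1) c
        omega
      · simp only [if_neg h1, if_neg h2, if_neg h3]
        have e1 := pvLen_eq s (l + 1) r c
        have e2 := pvLen_eq s l (r - 1) c
        have e3 := pvLen_eq s (l + 1) (r - 1) (c - 1)
        by_cases hc : c > 0
        · simp only [if_pos hc, pvMaxFst_four]
          rw [Int.max_def, Int.max_def]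
          split_ifs <;> simp_all <;> omega
        · simp only [if_neg hc, pvMaxFst_two]
          rw [Int.max_def]
          split_ifs <;> simp_all <;> omega
termination_by (r - l).toNat
decreasing_by all_goals omega

theorem pvInv_dpA (s : List Char) (l r c : Int) : pvInv l r (pvDpA s l r c).2 := by
  rw [pvDpA]
  by_cases h1 : l > r
  · simp [h1, pvInv]
  · by_cases h2 : l = r
    · simp [h1, h2, pvInv]
    · by_cases h3 : pvChar s l = pvChar s r
      · simp only [if_neg h1, if_neg h2, if_pos h3]
        exact ⟨by omega, by omega, by omega, by omega, pvInv_dpA s (l + 1) (r - 1) c⟩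
      · simp only [if_neg h1, if_neg h2, if_neg h3]
        have i1 := pvInv_mono (pvInv_dpA s (l + 1) r c) (show l ≤ l + 1 by omega) (le_refl r)
        have i2 := pvInv_mono (pvInv_dpA s l (r - 1) c) (le_refl l) (show r - 1 ≤ r by omega)
        have i3 := pvInv_dpA s (l + 1) (r - 1) (c - 1)
        by_cases hc : c > 0
        · simp only [if_pos hc, pvMaxFst_four]
          split_ifs <;>
            first
            | exact i1
            | exact i2
            | exact ⟨by omega, by omega, by omega, by omega, i3⟩
        · simp only [if_neg hc, pvMaxFst_two]
          split_ifs
          · exact i2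
          · exact i1
termination_by (r - l).toNat
decreasing_by all_goals omega

-- B's backtrack, started with accumulators (front, back), appends exactly A's decision
-- characters (all of them in front, the proper pairs in back)
theorem pvBack_eq (s : List Char) (l r c : Int) (f b : List Char) :
    pvBackB s l r c f b =
      (f ++ (pvDpA s l r c).2.map (fun d => d.2.2),
       b ++ ((pvDpA s l r c).2.filter (fun d => d.1 != d.2.1)).map (fun d => d.2.2)) := by
  rw [pvBackB, pvDpA]
  by_cases h1 : l > r
  · simp [h1]
  · by_cases h2 : l = r
    · simp [h1, h2]
    · by_cases h3 : pvChar s l = pvChar s r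
      · simp only [if_neg h1, if_neg h2, if_pos h3]
        rw [pvBack_eq s (l + 1) (r - 1) c]
        simp [show l ≠ r from h2]
      · simp only [if_neg h1, if_neg h2, if_neg h3]
        have e1 := pvLen_eq s (l + 1) r c
        have e2 := pvLen_eq s l (r - 1) c
        have e3 := pvLen_eq s (l + 1) (r - 1) (c - 1)
        have hbest : pvLenB s l r c =
            (if c > 0 then max (max (pvLenB s (l + 1) r c) (pvLenB s l (r - 1) c))
                (pvLenB s (l + 1) (r - 1) (c - 1) + 2)
             else max (pvLenB s (l + 1) r c) (pvLenB s l (r - 1) c)) := by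
          rw [pvLenB]; simp only [if_neg h1, if_neg h2, if_neg h3]
        by_cases hc : c > 0
        · simp only [if_pos hc, pvMaxFst_four]
          rw [if_pos hc] at hbest
          by_cases k1 : pvLenB s (l + 1) r c = pvLenB s l r c
          · have ha : ¬ ((pvDpA s l (r - 1) c).1 > (pvDpA s (l + 1) r c).1) := by
              rw [e1, e2]; omega
            have hb : ¬ ((pvDpA s (l + 1) (r - 1) (c - 1)).1 + 2 >
                (pvDpA s (l + 1) r c).1) := by rw [e1, e3]; omega
            rw [if_pos k1, if_neg ha, if_neg hb, if_neg hb]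
            exact pvBack_eq s (l + 1) r c f b
          · by_cases k2 : pvLenB s l (r - 1) c = pvLenB s l r c
            · have ha : (pvDpA s l (r - 1) c).1 > (pvDpA s (l + 1) r c).1 := by
                rw [e1, e2]; omega
              have hb : ¬ ((pvDpA s (l + 1) (r - 1) (c - 1)).1 + 2 >
                  (pvDpA s l (r - 1) c).1) := by rw [e2, e3]; omega
              rw [if_neg k1, if_pos k2, if_pos ha, if_neg hb, if_neg hb]
              exact pvBack_eq s l (r - 1) c f b
            · have hb : (pvDpA s (l + 1) (r - 1) (c - 1)).1 + 2 >
                  (if (pvDpA s l (r - 1) c).1 > (pvDpA s (l + 1) r c).1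
                   then pvDpA s l (r - 1) c else pvDpA s (l + 1) r c).1 := by
                split_ifs <;> [rw [e2, e3] ; rw [e1, e3]] <;> omega
              rw [if_neg k1, if_neg k2, if_pos hb]
              have hnot : ¬ ((pvDpA s (l + 1) (r - 1) (c - 1)).1 + 2 >
                  (pvDpA s (l + 1) (r - 1) (c - 1)).1 + 2) := by omega
              rw [if_neg hnot]
              rw [pvBack_eq s (l + 1) (r - 1) (c - 1)]
              simp [show l ≠ r from h2]
        · simp only [if_neg hc, pvMaxFst_two]
          rw [if_neg hc] at hbest
          by_cases k1 : pvLenB s (l + 1) r c = pvLenB s l r c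
          · have ha : ¬ ((pvDpA s l (r - 1) c).1 > (pvDpA s (l + 1) r c).1) := by
              rw [e1, e2]; omega
            rw [if_pos k1, if_neg ha]
            exact pvBack_eq s (l + 1) r c f b
          · have k2 : pvLenB s l (r - 1) c = pvLenB s l r c := by omega
            have ha : (pvDpA s l (r - 1) c).1 > (pvDpA s (l + 1) r c).1 := by
              rw [e1, e2]; omega
            rw [if_neg k1, if_pos k2, if_pos ha]
            exact pvBack_eq s l (r - 1) c f b
termination_by (r - l).toNat
decreasing_by all_goals omega

-- fill/array lemmas -------------------------------------------------------

theorem pvFill_cons (arr : List (Option Char)) (d : Int × Int × Char)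
    (ds : List (Int × Int × Char)) :
    pvFill arr (d :: ds) =
      pvFill ((arr.set d.1.toNat (some d.2.2)).set d.2.1.toNat (some d.2.2)) ds := rfl

theorem pvFill_length (ds : List (Int × Int × Char)) (arr : List (Option Char)) :
    (pvFill arr ds).length = arr.length := by
  induction ds generalizing arr with
  | nil => rfl
  | cons d ds ih => rw [pvFill_cons, ih]; simp

-- outside [l, r] the fill changes nothing
theorem pvFill_outside (ds : List (Int × Int × Char)) (l r : Int)
    (h0 : 0 ≤ l) (hinv : pvInv l r ds) (arr : List (Option Char))
    (i : Nat) (hil : (i : Int) < l ∨ r < (i : Int)) :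
    (pvFill arr ds)[i]? = arr[i]? := by
  induction ds generalizing arr l r with
  | nil => rfl
  | cons d ds ih =>
    obtain ⟨a, b, c⟩ := d
    obtain ⟨h1, h2, h3, _, h5⟩ := hinv
    rw [pvFill_cons]
    rw [ih (a + 1) (b - 1) (by omega) h5 _ (by omega)]
    have hia : b.toNat ≠ i := by omega
    have hib : a.toNat ≠ i := by omega
    rw [List.getElem?_set_ne hia, List.getElem?_set_ne hib]

-- a set at a position outside [l, r] commutes with the fill
theorem pvFill_set_comm (ds : List (Int × Int × Char)) (l r : Int)
    (h0 : 0 ≤ l) (hinv : pvInv l r ds) (arr : List (Option Char))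
    (p : Nat) (x : Option Char) (hp : (p : Int) < l ∨ r < (p : Int)) :
    pvFill (arr.set p x) ds = (pvFill arr ds).set p x := by
  induction ds generalizing arr l r with
  | nil => rfl
  | cons d ds ih =>
    obtain ⟨a, b, c⟩ := d
    obtain ⟨h1, h2, h3, _, h5⟩ := hinv
    rw [pvFill_cons, pvFill_cons]
    have hpa : p ≠ a.toNat := by omega
    have hpb : p ≠ b.toNat := by omega
    rw [List.set_comm x (some c) hpa, List.set_comm x (some c) hpb]
    exact ih (a + 1) (b - 1) (by omega) h5 _ (by omega)

theorem all_none_filterMap (xs : List (Option Char)) (h : ∀ o ∈ xs, o = none) :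
    xs.filterMap id = [] := by
  induction xs with
  | nil => rfl
  | cons x t ih =>
    have hx := h x (by simp)
    subst hx
    have ih' := ih fun o ho => h o (by simp [ho])
    have ih2 : List.filterMap (fun x => x) t = [] := ih'
    simp [List.filterMap_cons, ih2]

-- single set into a list whose suffix from b is all none
theorem set_suffix_filterMap (xs : List (Option Char)) (b : Nat) (ch : Char)
    (hb : b < xs.length) (h : ∀ o ∈ xs.drop b, o = none) :
    (xs.set b (some ch)).filterMap id = xs.filterMap id ++ [ch] := by
  induction xs generalizing b with
  | nil => simp at hb
  | cons x t ih =>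
    cases b with
    | zero =>
      have hx : x = none := h x (by simp)
      have ht : t.filterMap id = [] := all_none_filterMap t fun o ho => h o (by simp [ho])
      subst hx
      have ht' : List.filterMap (fun x => x) t = [] := ht
      simp [List.filterMap_cons, ht']
    | succ b =>
      have ht := ih b (by simpa using hb) (fun o ho => h o (by simpa using ho))
      have ht' : List.filterMap (fun x => x) (t.set b (some ch)) =
          List.filterMap (fun x => x) t ++ [ch] := ht
      rw [List.set_cons_succ]
      cases x with
      | none => simp [List.filterMap_cons, ht']
      | some y => simp [List.filterMap_cons, ht']

-- double set around an all-none prefix and suffix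
theorem set2_filterMap (arr : List (Option Char)) (a b : Nat) (ch : Char)
    (hab : a < b) (hb : b < arr.length)
    (hpre : ∀ o ∈ arr.take (a + 1), o = none)
    (hsuf : ∀ o ∈ arr.drop b, o = none) :
    ((arr.set a (some ch)).set b (some ch)).filterMap id =
      ch :: arr.filterMap id ++ [ch] := by
  induction arr generalizing a b with
  | nil => simp at hb
  | cons x t ih =>
    have hx : x = none := hpre x (by simp)
    subst hx
    obtain ⟨b', rfl⟩ : ∃ b', b = b' + 1 := ⟨b - 1, by omega⟩
    cases a with
    | zero =>
      have ht := set_suffix_filterMap t b' ch (by simpa using hb)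
        (fun o ho => hsuf o (by simpa using ho))
      have ht' : List.filterMap (fun x => x) (t.set b' (some ch)) =
          List.filterMap (fun x => x) t ++ [ch] := ht
      simp [List.filterMap_cons, ht']
    | succ a =>
      have ht := ih a b' (by omega) (by simpa using hb)
        (fun o ho => hpre o (by simp [ho]))
        (fun o ho => hsuf o (by simpa using ho))
      have ht' : List.filterMap (fun x => x) ((t.set a (some ch)).set b' (some ch)) =
          ch :: List.filterMap (fun x => x) t ++ [ch] := ht
      simp [List.filterMap_cons, ht']

theorem take_all_none (xs : List (Option Char)) (m : Nat)
    (h : ∀ i, i < m → xs[i]? = none ∨ xs[i]? = some none) :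
    ∀ o ∈ xs.take m, o = none := by
  intro o ho
  obtain ⟨i, hi, he⟩ := List.mem_iff_getElem.mp ho
  have him : i < m := lt_of_lt_of_le hi (by simp)
  have hix : i < xs.length := lt_of_lt_of_le hi (by simp)
  have hg : xs[i]? = some xs[i] := List.getElem?_eq_getElem hix
  rcases h i him with hh | hh
  · rw [hg] at hh; cases hh
  · rw [hg] at hh
    rw [← he, List.getElem_take]
    exact Option.some.inj hh

theorem drop_all_none (xs : List (Option Char)) (m : Nat)
    (h : ∀ i, m ≤ i → xs[i]? = none ∨ xs[i]? = some none) :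
    ∀ o ∈ xs.drop m, o = none := by
  intro o ho
  obtain ⟨i, hi, he⟩ := List.mem_iff_getElem.mp ho
  have hix : m + i < xs.length := by
    have := hi; simp [List.length_drop] at this; omega
  have hg : xs[m + i]? = some xs[m + i] := List.getElem?_eq_getElem hix
  rcases h (m + i) (by omega) with hh | hh
  · rw [hg] at hh; cases hh
  · rw [hg] at hh
    rw [← he, List.getElem_drop]
    exact Option.some.inj hh

theorem replicate_set_filterMap (n a : Nat) (ch : Char) (ha : a < n) :
    ((List.replicate n (none : Option Char)).set a (some ch)).filterMap id = [ch] := by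
  have hs := set_suffix_filterMap (List.replicate n none) a ch (by simpa using ha)
    (fun o ho => by simpa using List.eq_of_mem_replicate (List.mem_of_mem_drop ho))
  rw [hs, all_none_filterMap _ (fun o ho => List.eq_of_mem_replicate ho)]
  rfl

-- the main fill characterisation: the reconstruction of a nested decision list is
-- its chars in order, followed by the chars of the proper pairs in reverse order
theorem pvFill_spec (ds : List (Int × Int × Char)) (l r : Int) (n : Nat)
    (h0 : 0 ≤ l) (hr : r < (n : Int)) (hinv : pvInv l r ds) :
    (pvFill (List.replicate n (none : Option Char)) ds).filterMap id =
      ds.map (fun d => d.2.2) ++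
        ((ds.filter (fun d => d.1 != d.2.1)).map (fun d => d.2.2)).reverse := by
  induction ds generalizing l r with
  | nil =>
    simp only [List.map_nil, List.filter_nil, List.reverse_nil, List.append_nil]
    exact all_none_filterMap _ (fun o ho => List.eq_of_mem_replicate ho)
  | cons d ds ih =>
    obtain ⟨a, b, c⟩ := d
    obtain ⟨h1, h2, h3, h4, h5⟩ := hinv
    rw [pvFill_cons]
    simp only at *
    by_cases hab : a = b
    · have hds : ds = [] := h4 hab
      subst hds
      subst hab
      have haN : a.toNat < n := by omega
      rw [pvFill]
      simp only [List.foldl_nil, List.set_set]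
      rw [replicate_set_filterMap n a.toNat c haN]
      simp
    · have hlt : a < b := by omega
      rw [pvFill_set_comm ds (a + 1) (b - 1) (by omega) h5 _ b.toNat _ (by omega)]
      rw [pvFill_set_comm ds (a + 1) (b - 1) (by omega) h5 _ a.toNat _ (by omega)]
      have hlen : (pvFill (List.replicate n (none : Option Char)) ds).length = n := by
        rw [pvFill_length]; simp
      have hout := pvFill_outside ds (a + 1) (b - 1) (by omega) h5
        (List.replicate n (none : Option Char))
      have hset := set2_filterMap (pvFill (List.replicate n (none : Option Char)) ds)
        a.toNat b.toNat c (by omega) (by omega)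
        (take_all_none _ _ (fun i hi => by
          rw [hout i (by omega)]
          by_cases hin : i < n
          · right; simp [List.getElem?_replicate, hin]
          · left; simp [List.getElem?_replicate, hin]))
        (drop_all_none _ _ (fun i hi => by
          rw [hout i (by omega)]
          by_cases hin : i < n
          · right; simp [List.getElem?_replicate, hin]
          · left; simp [List.getElem?_replicate, hin]))
      rw [hset, ih (a + 1) (b - 1) (by omega) (by omega) h5]
      have hne : (a != b) = true := by simpa using hab
      simp [hne]

-- ===== VERDICT (by name: the statement is the Claim_ definition above) =====
theorem longest_palindromic_subsequence_with_k_changes_spec : Claim_equal_longest_palindromic_subsequence_with_k_changes := by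
  intro s k _
  unfold Spec_longest_palindromic_subsequence_with_k_changes
  unfold longest_palindromic_subsequence_with_k_changes
    longest_palindromic_subsequence_with_k_changes_alt
  simp only []
  have h1 := pvLen_eq s.toList 0 ((s.toList.length : Int) - 1) k
  have h2 := pvBack_eq s.toList 0 ((s.toList.length : Int) - 1) k [] []
  have h3 := pvFill_spec (pvDpA s.toList 0 ((s.toList.length : Int) - 1) k).2
    0 ((s.toList.length : Int) - 1) s.toList.length (by omega) (by omega)
    (pvInv_dpA s.toList 0 ((s.toList.length : Int) - 1) k)
  rw [Prod.ext_iff]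
  constructor
  · exact h1
  · rw [h2]
    simp only [List.nil_append]
    rw [h3]
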